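-- pv_equiv track=rewrite | github.com/alenny/leetcode-python3 | src/minimum-unique-word-abbreviation.py | countAbbrLen
-- ===== SOURCE A (Python) =====
-- def countAbbrLen(binary, strLen):
--     abbrlen = 0
--     countOne = 0
--     for i in range(strLen):
--         if binary & (1 << i):
--             countOne += 1
--             continue
--         if countOne > 0:
--             abbrlen += 1
--             countOne = 0
--         abbrlen += 1
--     if countOne > 0:
--         abbrlen += 1
--     return abbrlen
-- ===== SOURCE B (Python) =====
-- def countAbbrLen(binary, strLen):
--     # Closed form: the abbreviation has one segment per maximal run (of 0s or 1s,
--     # where each 0 is its own segment), which equals strLen minus the number of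
--     # adjacent 1-1 bit pairs among the low strLen bits.
--     if strLen <= 0:
--         return 0
--     b = binary % (1 << strLen)
--     return strLen - (b & (b >> 1)).bit_count()
-- ===== Notes on version B (the rewrite author's own statement) =====
-- stated objective: faster
-- what changed: Replaced A's per-bit Python loop carrying a run-length accumulator by a loop-free closed form: reduce binary modulo 2**strLen and return strLen minus the popcount of b & (b >> 1), the number of adjacent 1-1 bit pairs.
import Mathlib
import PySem

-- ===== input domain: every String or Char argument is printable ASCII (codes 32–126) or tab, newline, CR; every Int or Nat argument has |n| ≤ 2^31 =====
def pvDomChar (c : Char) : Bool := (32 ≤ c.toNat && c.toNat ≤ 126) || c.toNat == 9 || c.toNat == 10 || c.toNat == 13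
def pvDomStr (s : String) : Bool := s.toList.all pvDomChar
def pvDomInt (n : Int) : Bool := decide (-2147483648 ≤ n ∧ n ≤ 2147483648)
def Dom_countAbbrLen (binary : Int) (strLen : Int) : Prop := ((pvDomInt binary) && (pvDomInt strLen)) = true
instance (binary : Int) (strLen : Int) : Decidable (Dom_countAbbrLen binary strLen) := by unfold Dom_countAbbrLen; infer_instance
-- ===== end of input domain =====

-- B replaces A's stateful per-bit scan by a loop-free closed form:
-- strLen minus the number of adjacent 1-1 bit pairs among the low strLen bits (objective: faster, measured).

-- ===== PORT A =====
-- A's loop body on state (abbrlen, countOne); 'if binary & (1 << i):' is truthiness ≠ 0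
def pvStepA (binary : Int) (p : Int × Int) (i : Int) : Int × Int :=
  if PySem.Int.band binary ((1 : Int) <<< i.toNat) ≠ 0 then
    (p.1, p.2 + 1)
  else
    let p' := if 0 < p.2 then (p.1 + 1, (0 : Int)) else p
    (p'.1 + 1, p'.2)

def countAbbrLen (binary : Int) (strLen : Int) : Int :=
  let st := (PySem.List.pyRange 0 strLen 1).foldl (pvStepA binary) (0, 0)
  if 0 < st.2 then st.1 + 1 else st.1

-- ===== PORT B =====
-- 'if strLen <= 0: return 0; b = binary % (1 << strLen); return strLen - (b & (b >> 1)).bit_count()'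
def countAbbrLen_alt (binary : Int) (strLen : Int) : Int :=
  if strLen ≤ 0 then 0
  else
    let b := PySem.Int.mod binary ((1 : Int) <<< strLen.toNat)
    strLen - (PySem.Int.bitCount (PySem.Int.band b (b >>> (1:Nat))) : Int)

-- ===== PRECONDITION & SPEC =====
def Spec_countAbbrLen (binary : Int) (strLen : Int) (out : Int) : Prop := out = countAbbrLen_alt binary strLen
instance (binary : Int) (strLen : Int) (out : Int) : Decidable (Spec_countAbbrLen binary strLen out) := by unfold Spec_countAbbrLen; infer_instance

-- ===== CLAIM (what is proved, stated in full; the proofs are below) =====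
def Claim_equal_countAbbrLen : Prop := ∀ (binary : Int) (strLen : Int), Dom_countAbbrLen binary strLen → Spec_countAbbrLen binary strLen (countAbbrLen binary strLen)

-- ===== LEMMAS AND PROOFS =====

-- A's bit test at position i, as a Bool
def pvB (binary : Int) (i : Nat) : Bool := decide (PySem.Int.band binary ((1 : Int) <<< i) ≠ 0)

-- number of adjacent 1-1 pairs (seen at the higher index) among bits 0..n-1
def pvCnt (binary : Int) (n : Nat) : Nat :=
  (List.range n).countP (fun i => pvB binary i && decide (0 < i) && pvB binary (i - 1))

-- A's fold state after the first n iterations of its loop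
def pvStN (binary : Int) (n : Nat) : Int × Int :=
  (PySem.List.pyRange 0 (n : Int) 1).foldl (pvStepA binary) (0, 0)

lemma pv_stN_zero (binary : Int) : pvStN binary 0 = (0, 0) := by
  simp [pvStN, PySem.List.pyRange_one_eq_nil (le_refl (0:Int))]

lemma pv_cnt_succ (binary : Int) (n : Nat) :
    pvCnt binary (n + 1)
      = pvCnt binary n + (if pvB binary n && decide (0 < n) && pvB binary (n - 1) then 1 else 0) := by
  unfold pvCnt
  rw [List.range_succ, List.countP_append, List.countP_cons]
  simp

-- loop invariant: countOne is nonnegative, is positive exactly when the previous bit is 1,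
-- and abbrlen plus the pending flush equals n minus the number of adjacent 1-1 pairs
lemma pv_inv (binary : Int) (n : Nat) :
    0 ≤ (pvStN binary n).2 ∧
    (0 < (pvStN binary n).2 ↔ (0 < n ∧ pvB binary (n - 1) = true)) ∧
    (pvStN binary n).1 + (if 0 < (pvStN binary n).2 then 1 else 0)
      = (n : Int) - (pvCnt binary n : Int) := by
  induction n with
  | zero =>
      rw [pv_stN_zero]
      simp [pvCnt]
  | succ n ih =>
      obtain ⟨ih0, ih1, ih2⟩ := ih
      have hcast : ((n + 1 : Nat) : Int) = (n : Int) + 1 := by push_cast; ring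
      have hstN : pvStN binary (n + 1) = pvStepA binary (pvStN binary n) (n : Int) := by
        rw [pvStN, hcast, PySem.List.pyRange_one_succ_right (by positivity),
            List.foldl_append, List.foldl_cons, List.foldl_nil]
        rfl
      have hcnt := pv_cnt_succ binary n
      rw [hstN, hcast]
      unfold pvStepA
      simp only [Int.toNat_natCast]
      by_cases hb : PySem.Int.band binary ((1 : Int) <<< n) ≠ 0
      · have hbB : pvB binary n = true := by simp [pvB, hb]
        rw [if_pos hb]
        refine ⟨by simp; omega, ?_, ?_⟩
        · exact iff_of_true (by simp; omega) ⟨Nat.succ_pos n, by simpa using hbB⟩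
        · dsimp only
          rw [if_pos (by omega : 0 < (pvStN binary n).2 + 1)]
          by_cases hn : 0 < n
          · by_cases hp : pvB binary (n - 1) = true
            · have hc : 0 < (pvStN binary n).2 := ih1.mpr ⟨hn, hp⟩
              rw [if_pos hc] at ih2
              rw [hcnt, if_pos (by simp [hbB, hn, hp])]
              push_cast
              omega
            · have hc : ¬ 0 < (pvStN binary n).2 := fun h => hp (ih1.mp h).2
              rw [if_neg hc] at ih2
              rw [hcnt, if_neg (by simp [hp])]
              push_cast
              omega
          · have hn0 : n = 0 := by omega
            subst hn0
            rw [pv_stN_zero] at ih2 ⊢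
            rw [hcnt, if_neg (by simp)]
            simp [pvCnt] at ih2 ⊢
      · have hbB : pvB binary n = false := by simp [pvB] at hb ⊢; exact hb
        rw [if_neg hb]
        have hcnt' : pvCnt binary (n + 1) = pvCnt binary n := by
          simp [hcnt, hbB]
        by_cases hc : 0 < (pvStN binary n).2
        · rw [if_pos hc] at ih2 ⊢
          refine ⟨by norm_num, iff_of_false (by norm_num) (by simp [hbB]), ?_⟩
          dsimp only
          rw [if_neg (by norm_num : ¬ (0:Int) < 0), hcnt']
          omega
        · rw [if_neg hc] at ih2 ⊢
          refine ⟨ih0, iff_of_false hc (by simp [hbB]), ?_⟩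
          dsimp only
          rw [if_neg hc, hcnt']
          omega

lemma pv_nat_and_two_pow (m k : Nat) : (m &&& (1 <<< k) ≠ 0) ↔ m.testBit k := by
  rw [Nat.shiftLeft_eq, one_mul, Nat.and_two_pow]
  cases h : m.testBit k <;> simp

lemma pv_nat_shift_and_one (m k : Nat) : ((m >>> k) &&& 1 ≠ 0) ↔ m.testBit k := by
  simp [Nat.testBit, Nat.and_comm]

-- the two bit tests agree: 'binary & (1 << k)' vs '(binary >> k) & 1'
lemma pv_bit_eq (a : Int) (k : Nat) :
    (PySem.Int.band a ((1 : Int) <<< k) ≠ 0) ↔ (PySem.Int.band (a >>> k) 1 ≠ 0) := by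
  have hs2 : (m : Nat) → ((m >>> k) % 2 ≠ 0 ↔ m.testBit k) := fun m => by
    rw [← Nat.and_one_is_mod]; exact pv_nat_shift_and_one m k
  cases a with
  | ofNat m =>
      rw [show ((1:Int) <<< k) = ((1 <<< k : Nat) : Int) from rfl,
          show (Int.ofNat m) >>> k = ((m >>> k : Nat) : Int) from rfl,
          show Int.ofNat m = (m : Int) from rfl,
          show (1:Int) = ((1:Nat):Int) from rfl,
          PySem.Int.band_natCast, PySem.Int.band_natCast, ne_eq, ne_eq,
          Int.natCast_eq_zero, Int.natCast_eq_zero]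
      exact (pv_nat_and_two_pow m k).trans (pv_nat_shift_and_one m k).symm
  | negSucc m =>
      rw [show ((1:Int) <<< k) = ((1 <<< k : Nat) : Int) from rfl,
          show (Int.negSucc m) >>> k = Int.negSucc (m >>> k) from rfl]
      simp only [PySem.Int.band]
      have hA : ¬ (0:Int) ≤ Int.negSucc m := by omega
      have hB : ¬ (0:Int) ≤ Int.negSucc (m >>> k) := by
        generalize m >>> k = x; omega
      have e1 : (-(Int.negSucc m) - 1).toNat = m := by omega
      have e2 : (-(Int.negSucc (m >>> k)) - 1).toNat = m >>> k := by
        generalize m >>> k = x; omega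
      simp only [if_neg hA, if_neg hB,
        if_pos (by positivity : (0:Int) ≤ ((1 <<< k : Nat) : Int)),
        if_pos (by norm_num : (0:Int) ≤ (1:Int)), e1, e2, Int.toNat_natCast, Int.toNat_one]
      rw [Nat.shiftLeft_eq, one_mul, Nat.and_comm (2^k) m, Nat.and_two_pow,
          Nat.and_comm 1 _, Nat.and_one_is_mod]
      have hp : 0 < 2^k := Nat.two_pow_pos k
      have h2 := hs2 m
      simp only [ne_eq, Int.natCast_eq_zero]
      cases h : m.testBit k
      · simp only [h, Bool.false_eq_true, iff_false, not_not] at h2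
        simp only [Bool.toNat_false, Nat.zero_mul, Nat.sub_zero]
        generalize h3 : 2 ^ k = P at hp ⊢
        omega
      · simp only [h, iff_true] at h2
        simp only [Bool.toNat_true, Nat.one_mul, Nat.sub_self]
        simp only [not_true, false_iff, not_not]
        omega

-- A's test as a floor-division parity
lemma pv_band_ne_iff (a : Int) (k : Nat) :
    (PySem.Int.band a ((1 : Int) <<< k) ≠ 0) ↔ a / ((2 ^ k : Nat) : Int) % 2 = 1 := by
  rw [pv_bit_eq, PySem.Int.band_one, PySem.Int.mod_eq_emod_of_pos (by norm_num),
      Int.shiftRight_eq_div_pow]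
  have := Int.emod_two_eq (a / ((2 ^ k : Nat) : Int))
  constructor <;> intro h <;> omega

-- dividing out 2^i then reducing mod 2 ignores bits at or above L > i
lemma pv_div_mod_eq (a : Int) (L i : Nat) (h : i < L) :
    a / ((2 ^ i : Nat) : Int) % 2 = (a % ((2 ^ L : Nat) : Int)) / ((2 ^ i : Nat) : Int) % 2 := by
  have hsplit : a % ((2 ^ L : Nat) : Int) + ((2 ^ L : Nat) : Int) * (a / ((2 ^ L : Nat) : Int)) = a :=
    Int.emod_add_mul_ediv a _
  set q := a / ((2 ^ L : Nat) : Int) with hq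
  set r := a % ((2 ^ L : Nat) : Int) with hr
  have hLi : (2 ^ L : Nat) = 2 ^ i * (2 * 2 ^ (L - i - 1)) := by
    rw [← pow_succ', ← pow_add]
    congr 1
    omega
  have h2 : a = r + (q * (2 * 2 ^ (L - i - 1))) * ((2 ^ i : Nat) : Int) := by
    rw [← hsplit, hLi]
    push_cast
    ring
  calc a / ((2 ^ i : Nat) : Int) % 2
      = (r + (q * (2 * 2 ^ (L - i - 1))) * ((2 ^ i : Nat) : Int)) / ((2 ^ i : Nat) : Int) % 2 := by
        rw [← h2]
    _ = (r / ((2 ^ i : Nat) : Int) + q * (2 * 2 ^ (L - i - 1))) % 2 := by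
        rw [Int.add_mul_ediv_right _ _ (by positivity)]
    _ = (r / ((2 ^ i : Nat) : Int) + 2 * (q * 2 ^ (L - i - 1))) % 2 := by ring_nf
    _ = r / ((2 ^ i : Nat) : Int) % 2 := by
        rw [mul_comm (2:Int) (q * 2 ^ (L - i - 1)), Int.add_mul_emod_self_right]

-- bridge: A's bit test equals testBit of the masked value
lemma pv_bit_mod (a : Int) (L i : Nat) (h : i < L) :
    pvB a i = (a % ((2 ^ L : Nat) : Int)).toNat.testBit i := by
  have hP : (0:Int) < ((2 ^ L : Nat) : Int) := by positivity
  have hr0 : 0 ≤ a % ((2 ^ L : Nat) : Int) := Int.emod_nonneg a (ne_of_gt hP)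
  set N := (a % ((2 ^ L : Nat) : Int)).toNat with hN
  have hrN : a % ((2 ^ L : Nat) : Int) = (N : Int) := (Int.toNat_of_nonneg hr0).symm
  rw [Bool.eq_iff_iff, pvB, Nat.testBit_eq_decide_div_mod_eq, decide_eq_true_eq,
      decide_eq_true_eq, pv_band_ne_iff, pv_div_mod_eq a L i h, hrN]
  rw [← Int.natCast_ediv]
  omega

-- counting 1-1 pairs at the higher index over range (L+1) = counting them at the lower index over range L
lemma pv_pairs_aux (N : Nat) : ∀ L : Nat,
    (List.range (L + 1)).countP (fun i => N.testBit i && decide (0 < i) && N.testBit (i - 1))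
      = (List.range L).countP (fun i => N.testBit i && N.testBit (i + 1)) := by
  intro L
  induction L with
  | zero => simp
  | succ L ih =>
      rw [List.range_succ, List.countP_append, ih,
          List.range_succ, List.countP_append]
      simp [Bool.and_comm]

lemma pv_pairs (N L : Nat) (hN : N < 2 ^ L) :
    (List.range L).countP (fun i => N.testBit i && decide (0 < i) && N.testBit (i - 1))
      = (List.range L).countP (fun i => N.testBit i && N.testBit (i + 1)) := by
  have htop : N.testBit L = false := Nat.testBit_lt_two_pow hN
  have := pv_pairs_aux N L
  rw [List.range_succ, List.countP_append] at this
  simpa [htop] using this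

-- bit_count of a natural below 2^K counts its set bits over range K
lemma pv_bitCount (K : Nat) : ∀ C : Nat, C < 2 ^ K →
    PySem.Int.bitCount (C : Int) = (List.range K).countP (fun i => C.testBit i) := by
  induction K with
  | zero =>
      intro C hC
      interval_cases C
      simp [PySem.Int.bitCount_zero]
  | succ K ih =>
      intro C hC
      by_cases h0 : C = 0
      · subst h0
        simp [PySem.Int.bitCount_zero, Nat.zero_testBit]
      · rw [PySem.Int.bitCount_natCast (Nat.pos_of_ne_zero h0),
            ih (C / 2) (by
              have h2 : 2 ^ (K + 1) = 2 * 2 ^ K := by ring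
              omega),
            List.range_succ_eq_map, List.countP_cons, List.countP_map]
        have hcong : (List.range K).countP ((fun i => C.testBit i) ∘ Nat.succ)
            = (List.range K).countP (fun i => (C / 2).testBit i) := by
          apply List.countP_congr
          intro x _
          simp [Nat.testBit_succ]
        rw [hcong]
        rw [Nat.testBit_zero]
        rcases Nat.mod_two_eq_zero_or_one C with h | h
        · simp [h]
        · simp [h, Nat.add_comm]

-- ===== VERDICT (by name: the statement is the Claim_ definition above) =====
theorem countAbbrLen_spec : Claim_equal_countAbbrLen := by
  unfold Claim_equal_countAbbrLen
  intro binary strLen _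
  unfold Spec_countAbbrLen countAbbrLen countAbbrLen_alt
  by_cases h : strLen ≤ 0
  · rw [if_pos h, PySem.List.pyRange_one_eq_nil h]
    simp
  · rw [if_neg h]
    set L := strLen.toNat with hL
    have hL1 : 1 ≤ L := by omega
    have hstr : strLen = (L : Int) := by omega
    have hshl : ((1 : Int) <<< L) = ((2 ^ L : Nat) : Int) := by
      show ((1 <<< L : Nat) : Int) = _
      norm_num [Nat.shiftLeft_eq]
    have hP : (0:Int) < ((2 ^ L : Nat) : Int) := by positivity
    -- the masked value b and its natural form N
    have hb : PySem.Int.mod binary ((1 : Int) <<< L) = binary % ((2 ^ L : Nat) : Int) := by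
      rw [hshl, PySem.Int.mod_eq_emod_of_pos hP]
    set N := (binary % ((2 ^ L : Nat) : Int)).toNat with hN
    have hr0 : 0 ≤ binary % ((2 ^ L : Nat) : Int) := Int.emod_nonneg binary (ne_of_gt hP)
    have hrN : binary % ((2 ^ L : Nat) : Int) = (N : Int) := (Int.toNat_of_nonneg hr0).symm
    have hNlt : N < 2 ^ L := by
      have := Int.emod_lt_of_pos binary hP
      omega
    -- b >> 1 is N / 2
    have hshr : ((N : Int) >>> (1:Nat)) = ((N / 2 : Nat) : Int) := by
      rw [Int.shiftRight_eq_div_pow, Int.natCast_ediv]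
    -- b & (b >> 1) as a natural
    have hband : PySem.Int.band ((N : Int)) ((N : Int) >>> (1:Nat)) = ((N &&& N / 2 : Nat) : Int) := by
      rw [hshr, PySem.Int.band_natCast]
    -- its bit_count counts adjacent 1-1 pairs
    have hCle : N &&& N / 2 < 2 ^ L := Nat.lt_of_le_of_lt (Nat.and_le_left) hNlt
    have hcount : PySem.Int.bitCount ((N &&& N / 2 : Nat) : Int) = pvCnt binary L := by
      rw [pv_bitCount L _ hCle]
      have h1 : (List.range L).countP (fun i => (N &&& N / 2).testBit i)
          = (List.range L).countP (fun i => N.testBit i && N.testBit (i + 1)) := by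
        apply List.countP_congr
        intro x _
        simp [Nat.testBit_and, Nat.testBit_succ]
      have h2 : pvCnt binary L
          = (List.range L).countP (fun i => N.testBit i && decide (0 < i) && N.testBit (i - 1)) := by
        unfold pvCnt
        apply List.countP_congr
        intro x hx
        have hxL : x < L := List.mem_range.mp hx
        rw [pv_bit_mod binary L x hxL, pv_bit_mod binary L (x - 1) (by omega), ← hN]
      rw [h1, h2, pv_pairs N L hNlt]
    -- assemble
    obtain ⟨_, _, h3⟩ := pv_inv binary L
    have hst : (PySem.List.pyRange 0 strLen 1).foldl (pvStepA binary) (0, 0) = pvStN binary L := by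
      rw [pvStN, ← hstr]
    simp only [hst, hb, hrN, hband, hcount]
    split_ifs with hc
    · rw [if_pos hc] at h3
      omega
    · rw [if_neg hc] at h3
      omega
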